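-- pv_equiv track=rewrite | github.com/jugshaurya/Learn-Python | 2 - Programs including Datastructure Python/codechef/code-benders/TOARR.py | alpha
-- ===== SOURCE A (Python) =====
-- def alpha(n, m, arr1, arr2):
--     d = {}
--     if(n > m):
--         big = arr1
--         small = arr2
--     else:
--         big = arr2
--         small = arr1
--
--     for i in range(len(big)):
--         if(d.get(big[i])):
--             d[big[i]] += 1
--         else:
--             d[big[i]] = 1
--
--     result = []
--     for i in range(len(small)):
--         if(d.get(small[i]) and d[small[i]] != 0):
--             result.append(small[i])
--             d[small[i]] -= 1
--     return len(result)
-- ===== SOURCE B (Python) =====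
-- def alpha(n, m, arr1, arr2):
--     # intersection of the two frequency tables: sum of elementwise minimum counts
--     c1 = {}
--     for v in arr1:
--         c1[v] = c1.get(v, 0) + 1
--     c2 = {}
--     for v in arr2:
--         c2[v] = c2.get(v, 0) + 1
--     return sum(min(k, c2.get(v, 0)) for v, k in c1.items())
-- ===== Notes on version B (the rewrite author's own statement) =====
-- stated objective: alternative
-- what changed: Instead of building one frequency dict of the larger array and decrementing it while scanning the other array and collecting matches in a list, B builds both frequency tables once and returns the sum of the elementwise minimum counts (the intersection of the two counters), dropping the n>m branch since the result is symmetric.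
import Mathlib
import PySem

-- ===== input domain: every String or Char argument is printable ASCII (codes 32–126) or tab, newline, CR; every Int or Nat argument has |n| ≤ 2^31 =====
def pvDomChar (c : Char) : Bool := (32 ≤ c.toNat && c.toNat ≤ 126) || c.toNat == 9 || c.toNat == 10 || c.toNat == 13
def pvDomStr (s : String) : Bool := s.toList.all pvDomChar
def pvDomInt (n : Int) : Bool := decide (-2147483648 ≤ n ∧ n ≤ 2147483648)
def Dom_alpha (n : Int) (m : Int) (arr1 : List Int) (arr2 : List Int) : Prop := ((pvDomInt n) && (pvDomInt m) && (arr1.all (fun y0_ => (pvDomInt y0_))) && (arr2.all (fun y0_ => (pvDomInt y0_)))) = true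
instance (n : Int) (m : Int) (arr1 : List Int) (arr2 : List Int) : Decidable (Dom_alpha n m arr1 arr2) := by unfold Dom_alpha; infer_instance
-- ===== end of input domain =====

-- B replaces A's build-one-counter-then-decrement-while-scanning loop by building both
-- frequency tables and summing the elementwise minimum counts (same cost, alternative algorithm).

-- ===== PORT A =====
def alpha (n : Int) (m : Int) (arr1 : List Int) (arr2 : List Int) : Int :=
  let bs : List Int × List Int := if n > m then (arr1, arr2) else (arr2, arr1)
  let big := bs.1
  let small := bs.2
  -- for i in range(len(big)): if d.get(big[i]): d[big[i]] += 1 else: d[big[i]] = 1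
  let d : PySem.Dict Int Int := big.foldl (fun d x =>
    match d.get? x with
    | some v => if v != 0 then d.insert x (v + 1) else d.insert x 1
    | none => d.insert x 1) PySem.Dict.empty
  -- for i in range(len(small)): if d.get(small[i]) and d[small[i]] != 0: result.append(...); d[...] -= 1
  let st : PySem.Dict Int Int × List Int := small.foldl (fun st x =>
    match st.1.get? x with
    | some v => if v != 0 then (st.1.insert x (v - 1), st.2 ++ [x]) else st
    | none => st) (d, [])
  (st.2.length : Int)

-- ===== PORT B =====
def alpha_alt (n : Int) (m : Int) (arr1 : List Int) (arr2 : List Int) : Int :=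
  let c1 : PySem.Dict Int Int := arr1.foldl (fun d v => d.insert v (d.getD v 0 + 1)) PySem.Dict.empty
  let c2 : PySem.Dict Int Int := arr2.foldl (fun d v => d.insert v (d.getD v 0 + 1)) PySem.Dict.empty
  (c1.items.map (fun p => min p.2 (c2.getD p.1 0))).sum

-- ===== PRECONDITION & SPEC =====
def Spec_alpha (n : Int) (m : Int) (arr1 : List Int) (arr2 : List Int) (out : Int) : Prop := out = alpha_alt n m arr1 arr2
instance (n : Int) (m : Int) (arr1 : List Int) (arr2 : List Int) (out : Int) : Decidable (Spec_alpha n m arr1 arr2 out) := by unfold Spec_alpha; infer_instance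

-- ===== CLAIM (what is proved, stated in full; the proofs are below) =====
def Claim_equal_alpha : Prop := ∀ (n : Int) (m : Int) (arr1 : List Int) (arr2 : List Int), Dom_alpha n m arr1 arr2 → Spec_alpha n m arr1 arr2 (alpha n m arr1 arr2)

-- ===== LEMMAS AND PROOFS =====

-- model of A's second loop: decrement a frequency function while counting matches
def Sloop (g : Int → Int) : List Int → Nat
  | [] => 0
  | a :: t => if g a ≠ 0 then 1 + Sloop (fun y => if y = a then g a - 1 else g y) t else Sloop g t

lemma buildStep_eq (d : PySem.Dict Int Int) (x : Int) :
    (match d.get? x with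
     | some v => if v != 0 then d.insert x (v + 1) else d.insert x 1
     | none => d.insert x 1) = d.insert x (d.getD x 0 + 1) := by
  cases h : d.get? x with
  | none => simp [PySem.Dict.getD_of_get?_eq_none d 0 h]
  | some v =>
    rw [PySem.Dict.getD_of_get?_eq_some d 0 h]
    by_cases hv : v = 0 <;> simp [hv]

lemma build_getD (big : List Int) (v : Int) :
    ((big.foldl (fun d x =>
      match d.get? x with
      | some v => if v != 0 then d.insert x (v + 1) else d.insert x 1
      | none => d.insert x 1) PySem.Dict.empty : PySem.Dict Int Int)).getD v 0 = (big.count v : Int) := by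
  have h1 : (big.foldl (fun d x =>
      match d.get? x with
      | some v => if v != 0 then d.insert x (v + 1) else d.insert x 1
      | none => d.insert x 1) PySem.Dict.empty : PySem.Dict Int Int)
      = big.foldl (fun d x => d.insert x (d.getD x 0 + 1)) PySem.Dict.empty :=
    PySem.List.foldl_congr_mem _ _ _ _ (fun acc x _ => buildStep_eq acc x)
  rw [h1, PySem.Dict.getD_foldl_insert_add_one]
  simp

lemma loop2_len (small : List Int) (d : PySem.Dict Int Int) (acc : List Int) :
    (small.foldl (fun st x =>
      match st.1.get? x with
      | some v => if v != 0 then (st.1.insert x (v - 1), st.2 ++ [x]) else st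
      | none => st) ((d, acc) : PySem.Dict Int Int × List Int)).2.length
      = acc.length + Sloop (fun x => d.getD x 0) small := by
  induction small generalizing d acc with
  | nil => simp [Sloop]
  | cons a t ih =>
    simp only [List.foldl_cons]
    cases h : d.get? a with
    | none =>
      rw [show (match (none : Option Int) with
          | some v => if (v != 0) = true then (d.insert a (v - 1), acc ++ [a]) else (d, acc)
          | none => (d, acc)) = (d, acc) from rfl]
      rw [ih d acc]
      have hz : d.getD a 0 = 0 := PySem.Dict.getD_of_get?_eq_none d 0 h
      simp [Sloop, hz]
    | some v =>
      have hv0 : d.getD a 0 = v := PySem.Dict.getD_of_get?_eq_some d 0 h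
      rw [show (match (some v : Option Int) with
          | some v => if (v != 0) = true then (d.insert a (v - 1), acc ++ [a]) else (d, acc)
          | none => (d, acc))
          = if (v != 0) = true then (d.insert a (v - 1), acc ++ [a]) else (d, acc) from rfl]
      by_cases hv : v = 0
      · subst hv
        rw [if_neg (by simp)]
        rw [ih d acc]
        simp [Sloop, hv0]
      · rw [if_pos (by simp [hv])]
        rw [ih _ _]
        have hfun : (fun x => (d.insert a (v - 1)).getD x 0)
            = (fun y => if y = a then d.getD a 0 - 1 else d.getD y 0) := by
          funext y
          simp [PySem.Dict.getD_insert, hv0]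
        rw [hfun]
        simp only [Sloop, hv0, hv, if_pos, ne_eq, not_false_iff, List.length_append,
          List.length_singleton]
        omega

lemma sloop_eq_sum (l : List Int) (g : Int → Int) (hg : ∀ x, 0 ≤ g x) :
    (Sloop g l : Int) = ∑ x ∈ l.toFinset, min ((l.count x : Int)) (g x) := by
  induction l generalizing g with
  | nil => simp [Sloop]
  | cons a t ih =>
    have hmem : a ∈ (a :: t).toFinset := by simp
    have hsplit := (Finset.add_sum_erase _ (fun x => min (((a :: t).count x : Int)) (g x)) hmem).symm
    have herase : (a :: t).toFinset.erase a = t.toFinset.erase a := by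
      ext x; simp
    by_cases hz : g a = 0
    · have hstep : Sloop g (a :: t) = Sloop g t := by simp [Sloop, hz]
      rw [hstep, ih g hg, hsplit, herase]
      have h1 : min (((a :: t).count a : Int)) (g a) = 0 := by
        rw [hz]; exact min_eq_right (by positivity)
      rw [h1, zero_add]
      by_cases hat : a ∈ t.toFinset
      · rw [← Finset.add_sum_erase _ _ hat]
        have h2 : min ((t.count a : Int)) (g a) = 0 := by
          rw [hz]; exact min_eq_right (by positivity)
        rw [h2, zero_add]
        exact Finset.sum_congr rfl (fun x hx => by
          have hax : a ≠ x := fun he => (Finset.mem_erase.mp hx).1 he.symm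
          simp [List.count_cons, hax])
      · rw [Finset.erase_eq_of_notMem hat]
        exact Finset.sum_congr rfl (fun x hx => by
          have hax : a ≠ x := by rintro rfl; exact hat hx
          simp [List.count_cons, hax])
    · have hpos : 1 ≤ g a := lt_of_le_of_ne (hg a) (Ne.symm hz)
      have hstep : Sloop g (a :: t) = 1 + Sloop (fun y => if y = a then g a - 1 else g y) t := by
        simp [Sloop, hz]
      have hg' : ∀ x, 0 ≤ (fun y => if y = a then g a - 1 else g y) x := by
        intro x
        by_cases hx : x = a
        · simp [hx]; omega
        · simp [hx]; exact hg x
      rw [hstep, hsplit, herase]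
      push_cast
      rw [ih _ hg']
      by_cases hat : a ∈ t.toFinset
      · rw [← Finset.add_sum_erase _ _ hat]
        have hca : min (((a :: t).count a : Int)) (g a)
            = 1 + min ((t.count a : Int)) (g a - 1) := by
          simp only [List.count_cons_self]
          push_cast
          omega
        rw [hca]
        have hrest : ∀ x ∈ t.toFinset.erase a,
            min ((t.count x : Int)) ((fun y => if y = a then g a - 1 else g y) x)
              = min (((a :: t).count x : Int)) (g x) := by
          intro x hx
          have hax : a ≠ x := fun he => (Finset.mem_erase.mp hx).1 he.symm
          simp [List.count_cons, hax, Ne.symm hax]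
        rw [Finset.sum_congr rfl hrest]
        have h3 : min ((t.count a : Int)) ((fun y => if y = a then g a - 1 else g y) a)
            = min ((t.count a : Int)) (g a - 1) := by simp
        rw [h3]
        ring
      · rw [Finset.erase_eq_of_notMem hat]
        have hta : t.count a = 0 := by
          rw [List.count_eq_zero]
          intro h; exact hat (List.mem_toFinset.mpr h)
        have hca : min (((a :: t).count a : Int)) (g a) = 1 := by
          simp only [List.count_cons_self, hta]
          push_cast
          omega
        rw [hca]
        have hrest : ∀ x ∈ t.toFinset,
            min ((t.count x : Int)) ((fun y => if y = a then g a - 1 else g y) x)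
              = min (((a :: t).count x : Int)) (g x) := by
          intro x hx
          have hax : a ≠ x := by rintro rfl; exact hat hx
          simp [List.count_cons, hax, Ne.symm hax]
        rw [Finset.sum_congr rfl hrest]

lemma alt_eq_sum (n m : Int) (arr1 arr2 : List Int) :
    alpha_alt n m arr1 arr2
      = ∑ x ∈ arr1.toFinset, min ((arr1.count x : Int)) ((arr2.count x : Int)) := by
  unfold alpha_alt
  show ((PySem.Dict.counter arr1).items.map
      (fun p => min p.2 ((PySem.Dict.counter arr2).getD p.1 0))).sum = _
  rw [PySem.Dict.items_counter, List.map_map]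
  have hcomp : ((fun p : Int × Int => min p.2 ((PySem.Dict.counter arr2).getD p.1 0)) ∘
      (fun k => (k, (arr1.count k : Int))))
      = fun k => min ((arr1.count k : Int)) ((arr2.count k : Int)) := by
    funext k
    simp [PySem.Dict.getD_counter]
  rw [hcomp]
  have hfs : (PySem.Set.ofList arr1).toFinset = arr1.toFinset := by
    ext x
    simp [← PySem.List.dedup_eq_ofList, PySem.List.mem_dedup]
  rw [← hfs, List.sum_toFinset _ (by rw [← PySem.List.dedup_eq_ofList]; exact PySem.List.nodup_dedup arr1)]

lemma sum_min_symm (l1 l2 : List Int) :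
    ∑ x ∈ l1.toFinset, min ((l1.count x : Int)) ((l2.count x : Int))
      = ∑ x ∈ l2.toFinset, min ((l1.count x : Int)) ((l2.count x : Int)) := by
  have h1 : ∑ x ∈ l1.toFinset, min ((l1.count x : Int)) ((l2.count x : Int))
      = ∑ x ∈ l1.toFinset ∪ l2.toFinset, min ((l1.count x : Int)) ((l2.count x : Int)) := by
    apply Finset.sum_subset Finset.subset_union_left
    intro x _ hx
    have : l1.count x = 0 := by
      rw [List.count_eq_zero]
      intro h; exact hx (List.mem_toFinset.mpr h)
    simp [this]
  have h2 : ∑ x ∈ l2.toFinset, min ((l1.count x : Int)) ((l2.count x : Int))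
      = ∑ x ∈ l1.toFinset ∪ l2.toFinset, min ((l1.count x : Int)) ((l2.count x : Int)) := by
    apply Finset.sum_subset Finset.subset_union_right
    intro x _ hx
    have : l2.count x = 0 := by
      rw [List.count_eq_zero]
      intro h; exact hx (List.mem_toFinset.mpr h)
    simp [this]
  rw [h1, h2]

lemma alpha_eq_sum (big small : List Int) :
    ((small.foldl (fun st x =>
      match st.1.get? x with
      | some v => if v != 0 then (st.1.insert x (v - 1), st.2 ++ [x]) else st
      | none => st)
      (((big.foldl (fun d x =>
        match d.get? x with
        | some v => if v != 0 then d.insert x (v + 1) else d.insert x 1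
        | none => d.insert x 1) PySem.Dict.empty : PySem.Dict Int Int), ([] : List Int)))).2.length : Int)
      = ∑ x ∈ small.toFinset, min ((small.count x : Int)) ((big.count x : Int)) := by
  rw [loop2_len]
  have hfun : (fun x => (big.foldl (fun d x =>
      match d.get? x with
      | some v => if v != 0 then d.insert x (v + 1) else d.insert x 1
      | none => d.insert x 1) PySem.Dict.empty : PySem.Dict Int Int).getD x 0)
      = fun x => (big.count x : Int) := by
    funext x; exact build_getD big x
  rw [hfun]
  simp only [List.length_nil, Nat.zero_add]
  rw [sloop_eq_sum small _ (fun x => by positivity)]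

-- ===== VERDICT (by name: the statement is the Claim_ definition above) =====
theorem alpha_spec : Claim_equal_alpha := by
  intro n m arr1 arr2 _
  unfold Spec_alpha alpha
  rw [alt_eq_sum]
  by_cases h : n > m
  · simp only [h, if_pos]
    rw [alpha_eq_sum arr1 arr2]
    rw [sum_min_symm arr2 arr1]
    simp only [min_comm]
  · simp only [h, if_neg, not_false_iff]
    rw [alpha_eq_sum arr2 arr1]
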